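-- pv_equiv track=rewrite | github.com/MosesBomera/Feedback-Prize-Evaluating-Student-Writing | LeftmostSeg/utils.py | getFullLabelSequence
-- ===== SOURCE A (Python) =====
-- from itertools import chain
--
-- def getFullLabelSequence(segmentSequence,labelSequence, textArrayLen):
--     """Get the full label sequence for a given essay."""
--     def getGaps(start, end, segmentSequence):
--         """Get gaps in a sequence. https://stackoverflow.com/a/63814623/16419190"""
--         ranges = sorted(segmentSequence)
--         gaps = chain((start - 1,), chain.from_iterable(segmentSequence), (end + 1,))
--         return [(x+1, y-1) for x, y in zip(gaps, gaps) if x+1 < y]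
--
--     # Sort the segment sequence. (Might be redundant.)
--     segmentSequence = sorted(segmentSequence)
--     # Get gaps.
--     gaps = getGaps(0, textArrayLen - 1, segmentSequence)
--     # Add discourse types to the segmentSequence.
--     segmentSequence = [ss + (ls,) for ss, ls in zip(segmentSequence, labelSequence)]
--     gapSequence = [(segment[0], segment[1], 'Untyped') for segment in gaps]
--     # Sort the sequence by the second element.
--     segmentSequence = sorted(segmentSequence + gapSequence, key=lambda seg: seg[1])
--     for idx in range(len(segmentSequence)):
--         try:
--             if segmentSequence[idx+1][0] == segmentSequence[idx][1]:
--                 # Shift the next bound by one from the end bound of the previous bound.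
--                 segmentSequence[idx+1] = (
--                     segmentSequence[idx][1] + 1,segmentSequence[idx+1][1], segmentSequence[idx+1][2]
--                     )
--         except IndexError:
--             continue
--     return segmentSequence
-- ===== SOURCE B (Python) =====
-- def getFullLabelSequence(segmentSequence, labelSequence, textArrayLen):
--     """Get the full label sequence for a given essay."""
--     segs = sorted(segmentSequence)
--     # Labeled segments, sorted by their end coordinate (stable; zip truncation kept).
--     labeled = sorted([(s, e, l) for (s, e), l in zip(segs, labelSequence)],
--                      key=lambda t: t[1])
--     # Gaps collected in one accumulator pass over the sorted segments.
--     gaps = []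
--     prev = -1
--     for s, e in segs:
--         if prev + 1 < s:
--             gaps.append((prev + 1, s - 1, 'Untyped'))
--         prev = e
--     if prev + 1 < textArrayLen:
--         gaps.append((prev + 1, textArrayLen - 1, 'Untyped'))
--     gaps = sorted(gaps, key=lambda t: t[1])
--     # Two-pointer merge of the two end-sorted streams (labeled wins ties),
--     # applying the boundary-overlap fix on the fly.
--     out = []
--     i = j = 0
--     prev_end = None
--     while i < len(labeled) or j < len(gaps):
--         if j >= len(gaps) or (i < len(labeled) and labeled[i][1] <= gaps[j][1]):
--             t = labeled[i]
--             i += 1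
--         else:
--             t = gaps[j]
--             j += 1
--         start = prev_end + 1 if t[0] == prev_end else t[0]
--         out.append((start, t[1], t[2]))
--         prev_end = t[1]
--     return out
-- ===== Notes on version B (the rewrite author's own statement) =====
-- stated objective: alternative
-- what changed: Instead of A's concatenate-then-resort shape (gaps via the chain/zip same-iterator pairing trick, labeled+gaps concatenated and stably re-sorted by end, then an in-place index fix loop under try/except), B collects gaps in one accumulator pass over the sorted segments, keeps the two streams separate, and produces the output by a two-pointer stable merge of the two end-sorted streams with the boundary-overlap fix applied on the fly while emitting; no combined list is ever built or re-sorted and no index mutation pass runs.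
import Mathlib
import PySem

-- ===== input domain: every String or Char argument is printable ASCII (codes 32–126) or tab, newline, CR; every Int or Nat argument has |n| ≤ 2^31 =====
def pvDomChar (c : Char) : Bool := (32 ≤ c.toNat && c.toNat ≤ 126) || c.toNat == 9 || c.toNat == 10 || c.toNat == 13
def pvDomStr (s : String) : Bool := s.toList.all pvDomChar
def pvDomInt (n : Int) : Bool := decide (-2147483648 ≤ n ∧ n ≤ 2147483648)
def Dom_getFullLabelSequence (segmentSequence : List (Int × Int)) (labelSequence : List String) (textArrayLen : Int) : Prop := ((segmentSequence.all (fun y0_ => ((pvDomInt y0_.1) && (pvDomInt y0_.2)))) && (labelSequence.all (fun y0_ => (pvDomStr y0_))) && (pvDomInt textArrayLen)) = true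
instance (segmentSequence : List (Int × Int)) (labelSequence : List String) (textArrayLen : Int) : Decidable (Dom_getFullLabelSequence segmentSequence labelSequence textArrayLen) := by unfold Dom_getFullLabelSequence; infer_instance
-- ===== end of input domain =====

-- B replaces A's concatenate-and-resort shape by a two-pointer merge of two end-sorted
-- streams with the boundary fix applied while emitting; equal return values are proved
-- on all inputs (objective: alternative; A mutates only a local list).

-- ===== PORT A =====
-- Python's 'zip(gaps, gaps)' on ONE iterator pairs consecutive elements; exact port:
def pvPairUp : List Int → List (Int × Int)
  | x :: y :: r => (x, y) :: pvPairUp r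
  | _ => []

-- the body of A's fix loop (reads idx and idx+1; IndexError → unchanged)
def pvStepA (l : List (Int × Int × String)) (idx : Nat) : List (Int × Int × String) :=
  match PySem.List.pyGet? l ((idx : Int) + 1), PySem.List.pyGet? l (idx : Int) with
  | some nxt, some cur =>
      if nxt.1 = cur.2.1 then PySem.List.pySetD l ((idx : Int) + 1) (cur.2.1 + 1, nxt.2)
      else l
  | _, _ => l

def getFullLabelSequence (segmentSequence : List (Int × Int)) (labelSequence : List String) (textArrayLen : Int) : List (Int × Int × String) :=
  -- segmentSequence = sorted(segmentSequence)
  let segs := PySem.List.sorted2 segmentSequence Prod.fst Prod.snd false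
  -- getGaps(0, textArrayLen - 1, segs):
  let _ranges := PySem.List.sorted2 segs Prod.fst Prod.snd false  -- computed and unused, as in the Python
  let flat := segs.flatMap (fun p => [p.1, p.2])
  let gaps := (pvPairUp ((0 - 1) :: (flat ++ [(textArrayLen - 1) + 1]))).filterMap
      (fun p => if p.1 + 1 < p.2 then some (p.1 + 1, p.2 - 1) else none)
  -- segmentSequence = [ss + (ls,) for ss, ls in zip(segmentSequence, labelSequence)]
  let labeled := (segs.zip labelSequence).map (fun q => (q.1.1, q.1.2, q.2))
  let gapSequence := gaps.map (fun g => (g.1, g.2, "Untyped"))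
  let combined := PySem.List.sorted (labeled ++ gapSequence) (fun t => t.2.1) false
  -- for idx in range(len(...)): try: … except IndexError: continue
  (List.range combined.length).foldl pvStepA combined

-- ===== PORT B =====
-- Source B's while loop with indices i, j over the two lists and the running prev_end,
-- transcribed as recursion on the two unread suffixes (same tests, same order):
def pvMergeFix (prev : Option Int) : List (Int × Int × String) → List (Int × Int × String) → List (Int × Int × String)
  | [], [] => []
  | [], y :: ys =>
      ((match prev with | some pe => if y.1 = pe then pe + 1 else y.1 | none => y.1), y.2)
        :: pvMergeFix (some y.2.1) [] ys
  | x :: xs, [] =>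
      ((match prev with | some pe => if x.1 = pe then pe + 1 else x.1 | none => x.1), x.2)
        :: pvMergeFix (some x.2.1) xs []
  | x :: xs, y :: ys =>
      if x.2.1 ≤ y.2.1 then
        ((match prev with | some pe => if x.1 = pe then pe + 1 else x.1 | none => x.1), x.2)
          :: pvMergeFix (some x.2.1) xs (y :: ys)
      else
        ((match prev with | some pe => if y.1 = pe then pe + 1 else y.1 | none => y.1), y.2)
          :: pvMergeFix (some y.2.1) (x :: xs) ys

def getFullLabelSequence_alt (segmentSequence : List (Int × Int)) (labelSequence : List String) (textArrayLen : Int) : List (Int × Int × String) :=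
  let segs := PySem.List.sorted2 segmentSequence Prod.fst Prod.snd false
  -- labeled segments, stably sorted by end (zip truncation kept)
  let labeled := PySem.List.sorted ((segs.zip labelSequence).map (fun q => (q.1.1, q.1.2, q.2))) (fun t => t.2.1) false
  -- one accumulator pass: gaps between consecutive sorted segments, then trailing gap
  let gp := segs.foldl (fun (acc : List (Int × Int × String) × Int) p =>
      ((if acc.2 + 1 < p.1 then acc.1 ++ [(acc.2 + 1, p.1 - 1, "Untyped")] else acc.1), p.2)) ([], -1)
  let gaps0 := if gp.2 + 1 < textArrayLen then gp.1 ++ [(gp.2 + 1, textArrayLen - 1, "Untyped")] else gp.1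
  let gaps := PySem.List.sorted gaps0 (fun t => t.2.1) false
  -- two-pointer merge of the two end-sorted streams, fixing boundaries on the fly
  pvMergeFix none labeled gaps

-- ===== PRECONDITION & SPEC =====
def Spec_getFullLabelSequence (segmentSequence : List (Int × Int)) (labelSequence : List String) (textArrayLen : Int) (out : List (Int × Int × String)) : Prop := out = getFullLabelSequence_alt segmentSequence labelSequence textArrayLen
instance (segmentSequence : List (Int × Int)) (labelSequence : List String) (textArrayLen : Int) (out : List (Int × Int × String)) : Decidable (Spec_getFullLabelSequence segmentSequence labelSequence textArrayLen out) := by unfold Spec_getFullLabelSequence; infer_instance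

-- ===== CLAIM (what is proved, stated in full; the proofs are below) =====
def Claim_equal_getFullLabelSequence : Prop := ∀ (segmentSequence : List (Int × Int)) (labelSequence : List String) (textArrayLen : Int), Dom_getFullLabelSequence segmentSequence labelSequence textArrayLen → Spec_getFullLabelSequence segmentSequence labelSequence textArrayLen (getFullLabelSequence segmentSequence labelSequence textArrayLen)

-- ===== LEMMAS AND PROOFS =====

-- unfolding lemmas for the well-founded recursions
theorem pvMergeFix_nil_nil (p : Option Int) : pvMergeFix p [] [] = [] := by rw [pvMergeFix]

theorem pvMergeFix_nil_cons (p : Option Int) (y : Int × Int × String) (ys : List (Int × Int × String)) :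
    pvMergeFix p [] (y :: ys)
      = ((match p with | some pe => if y.1 = pe then pe + 1 else y.1 | none => y.1), y.2)
          :: pvMergeFix (some y.2.1) [] ys := by rw [pvMergeFix.eq_def]

theorem pvMergeFix_cons_nil (p : Option Int) (x : Int × Int × String) (xs : List (Int × Int × String)) :
    pvMergeFix p (x :: xs) []
      = ((match p with | some pe => if x.1 = pe then pe + 1 else x.1 | none => x.1), x.2)
          :: pvMergeFix (some x.2.1) xs [] := by rw [pvMergeFix.eq_def]

theorem pvMergeFix_cons_cons (p : Option Int) (x y : Int × Int × String) (xs ys : List (Int × Int × String)) :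
    pvMergeFix p (x :: xs) (y :: ys)
      = if x.2.1 ≤ y.2.1 then
          ((match p with | some pe => if x.1 = pe then pe + 1 else x.1 | none => x.1), x.2)
            :: pvMergeFix (some x.2.1) xs (y :: ys)
        else
          ((match p with | some pe => if y.1 = pe then pe + 1 else y.1 | none => y.1), y.2)
            :: pvMergeFix (some y.2.1) (x :: xs) ys := by rw [pvMergeFix.eq_def]

-- plain stable merge by the end coordinate (left list wins ties)
def pvMerge : List (Int × Int × String) → List (Int × Int × String) → List (Int × Int × String)
  | [], ys => ys
  | x :: xs, [] => x :: xs
  | x :: xs, y :: ys =>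
      if x.2.1 ≤ y.2.1 then x :: pvMerge xs (y :: ys) else y :: pvMerge (x :: xs) ys

theorem pvMerge_nilL (ys : List (Int × Int × String)) : pvMerge [] ys = ys := by rw [pvMerge]

theorem pvMerge_nilR (xs : List (Int × Int × String)) : pvMerge xs [] = xs := by
  cases xs <;> rw [pvMerge]

theorem pvMerge_cons (x y : Int × Int × String) (xs ys : List (Int × Int × String)) :
    pvMerge (x :: xs) (y :: ys)
      = if x.2.1 ≤ y.2.1 then x :: pvMerge xs (y :: ys) else y :: pvMerge (x :: xs) ys := by
  rw [pvMerge]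

-- internal gaps of a sorted segment list, previous end pe
def pvInternal (pe : Int) : List (Int × Int) → List (Int × Int × String)
  | [] => []
  | p :: r => (if pe + 1 < p.1 then [(pe + 1, p.1 - 1, "Untyped")] else []) ++ pvInternal p.2 r

-- last segment end (or pe when there is none)
def pvEndOf (pe : Int) : List (Int × Int) → Int
  | [] => pe
  | p :: r => pvEndOf p.2 r

-- the boundary fix as a forward scan carrying the previous (original) end
def pvGo (p : Option Int) : List (Int × Int × String) → List (Int × Int × String)
  | [] => []
  | t :: r => ((match p with
                | some pe => if t.1 = pe then pe + 1 else t.1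
                | none => t.1), t.2) :: pvGo (some t.2.1) r

theorem pvGapsA_eq (u : Int × Int → Int × Int × String) (hu : u = fun g => (g.1, g.2, "Untyped")) :
    ∀ (segs : List (Int × Int)) (pe tl : Int),
    ((pvPairUp (pe :: (segs.flatMap (fun p => [p.1, p.2]) ++ [tl]))).filterMap
        (fun p => if p.1 + 1 < p.2 then some (p.1 + 1, p.2 - 1) else none)).map u
      = pvInternal pe segs ++ (if pvEndOf pe segs + 1 < tl then [(pvEndOf pe segs + 1, tl - 1, "Untyped")] else []) := by
  subst hu
  intro segs
  induction segs with
  | nil =>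
      intro pe tl
      simp only [List.flatMap_nil, List.nil_append, pvPairUp, pvInternal, pvEndOf,
        List.filterMap_cons, List.filterMap_nil]
      split_ifs with h <;> simp
  | cons p r ih =>
      intro pe tl
      simp only [List.flatMap_cons, List.cons_append, List.append_assoc, pvPairUp,
        List.filterMap_cons, pvInternal, pvEndOf, List.nil_append]
      split_ifs <;> (try dsimp only) <;> (try rw [List.map_cons]) <;> rw [ih] <;> simp [*]

theorem pvFoldB_gaps : ∀ (segs : List (Int × Int)) (acc : List (Int × Int × String)) (pe : Int),
    segs.foldl (fun (acc : List (Int × Int × String) × Int) p =>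
        ((if acc.2 + 1 < p.1 then acc.1 ++ [(acc.2 + 1, p.1 - 1, "Untyped")] else acc.1), p.2)) (acc, pe)
      = (acc ++ pvInternal pe segs, pvEndOf pe segs) := by
  intro segs
  induction segs with
  | nil => intro acc pe; simp [pvInternal, pvEndOf]
  | cons p r ih =>
      intro acc pe
      simp only [List.foldl_cons, pvInternal, pvEndOf]
      rw [ih]
      split_ifs <;> simp

theorem pvGo_length (p : Option Int) (l : List (Int × Int × String)) : (pvGo p l).length = l.length := by
  induction l generalizing p with
  | nil => rfl
  | cons t r ih => simp [pvGo, ih]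

theorem pvFoldA_mid :
    ∀ (l pre : List (Int × Int × String)) (h : pre ≠ []),
    (List.range' (pre.length - 1) l.length).foldl pvStepA (pre ++ l)
      = pre ++ pvGo (some ((pre.getLast h).2.1)) l := by
  intro l
  induction l with
  | nil => intro pre h; simp [pvGo]
  | cons t r ih =>
      intro pre h
      have hlen : pre.length - 1 + 1 = pre.length := Nat.succ_pred_eq_of_pos (List.length_pos_iff.mpr h)
      simp only [List.length_cons]
      rw [List.range'_succ, List.foldl_cons]
      have hget1 : PySem.List.pyGet? (pre ++ t :: r) ((↑(pre.length - 1) : Int) + 1) = some t := by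
        rw [show ((↑(pre.length - 1) : Int) + 1) = ((pre.length : Nat) : Int) by omega]
        exact PySem.List.pyGet?_append_length pre r t
      have hget0 : PySem.List.pyGet? (pre ++ t :: r) ((↑(pre.length - 1) : Int)) = some (pre.getLast h) := by
        rw [PySem.List.pyGet?_natCast, List.getElem?_append_left
          (by omega : pre.length - 1 < pre.length), List.getLast_eq_getElem,
          List.getElem?_eq_getElem]
      have hset : ∀ v, PySem.List.pySetD (pre ++ t :: r) ((↑(pre.length - 1) : Int) + 1) v
          = pre ++ v :: r := by
        intro v
        rw [show ((↑(pre.length - 1) : Int) + 1) = ((pre.length : Nat) : Int) by omega,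
          PySem.List.pySetD_natCast, List.set_append_right _ _ (Nat.le_refl _)]
        simp
      set pe := (pre.getLast h).2.1 with hpe
      set t' := ((if t.1 = pe then pe + 1 else t.1, t.2) : Int × Int × String) with ht'
      have hstep1 : pvStepA (pre ++ t :: r) (pre.length - 1) = pre ++ t' :: r := by
        unfold pvStepA
        simp only [hget1, hget0, ← hpe, ht']
        by_cases hc : t.1 = pe
        · simp [hc, hset]
        · simp [hc]
      rw [hstep1, hlen]
      have hpre' : (pre ++ [t']) ≠ [] := by simp
      have h2 := ih (pre ++ [t']) hpre'
      rw [show (pre ++ [t']) ++ r = pre ++ t' :: r by simp] at h2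
      rw [show (pre ++ [t']).length - 1 = pre.length by simp] at h2
      rw [h2, List.getLast_append_singleton]
      simp only [pvGo, ht']
      simp

theorem pvFoldA_fix (l : List (Int × Int × String)) :
    (List.range l.length).foldl pvStepA l = pvGo none l := by
  cases l with
  | nil => simp [pvGo]
  | cons a r =>
      have hr : (a :: r).length = r.length + 1 := rfl
      rw [hr, List.range_succ, List.foldl_append]
      have h1 : (List.range r.length).foldl pvStepA (a :: r) = a :: pvGo (some a.2.1) r := by
        have := pvFoldA_mid r [a] (by simp)
        simpa [List.range_eq_range'] using this
      rw [h1]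
      have hlen : (a :: pvGo (some a.2.1) r).length = r.length + 1 := by simp [pvGo_length]
      rw [List.foldl_cons, List.foldl_nil]
      unfold pvStepA
      have : PySem.List.pyGet? (a :: pvGo (some a.2.1) r) ((↑r.length : Int) + 1) = none := by
        rw [show ((↑r.length : Int) + 1) = ((r.length + 1 : Nat) : Int) by omega,
          PySem.List.pyGet?_natCast, List.getElem?_eq_none (by omega)]
      simp only [this]
      simp [pvGo]

-- Source B's fused merge+fix IS the fix scan over the plain merge
theorem pvMergeFix_eq_go : ∀ (xs ys : List (Int × Int × String)) (p : Option Int),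
    pvMergeFix p xs ys = pvGo p (pvMerge xs ys) := by
  intro xs
  induction xs with
  | nil =>
      intro ys
      induction ys with
      | nil => intro p; rw [pvMergeFix_nil_nil, pvMerge_nilL]; rfl
      | cons y ys ihy => intro p; rw [pvMergeFix_nil_cons, pvMerge_nilL]; simp [pvGo, ihy, pvMerge_nilL]
  | cons x xs ihx =>
      intro ys
      induction ys with
      | nil =>
          intro p
          rw [pvMergeFix_cons_nil, pvMerge_nilR]
          simp [pvGo, ihx [], pvMerge_nilR]
      | cons y ys ihy =>
          intro p
          rw [pvMergeFix_cons_cons, pvMerge_cons]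
          split_ifs with h
          · simp [pvGo, ihx (y :: ys)]
          · simp [pvGo, ihy]

-- inserting an element into [g] is merging with [g]
theorem pvIns_single : ∀ (A : List (Int × Int × String)) (g : Int × Int × String),
    PySem.List.insertBy (fun a b => decide (a.2.1 < b.2.1)) g A = pvMerge A [g] := by
  intro A
  induction A with
  | nil => intro g; rw [pvMerge_nilL]; rfl
  | cons a A' ih =>
      intro g
      rw [pvMerge_cons]
      simp only [PySem.List.insertBy, decide_eq_true_eq]
      by_cases h : g.2.1 < a.2.1
      · rw [if_pos h, if_neg (not_le.mpr h), pvMerge_nilR]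
      · rw [if_neg h, if_pos (le_of_not_gt h), ih]

-- inserting into a merge = merging with the insertion done on the right list
theorem pvIns_merge :
    ∀ (B A : List (Int × Int × String)) (g : Int × Int × String),
    PySem.List.insertBy (fun a b => decide (a.2.1 < b.2.1)) g (pvMerge A B)
      = pvMerge A (PySem.List.insertBy (fun a b => decide (a.2.1 < b.2.1)) g B) := by
  intro B
  induction B with
  | nil =>
      intro A g
      rw [pvMerge_nilR, show PySem.List.insertBy (fun a b => decide (a.2.1 < b.2.1)) g
        ([] : List (Int × Int × String)) = [g] from rfl]
      exact pvIns_single A g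
  | cons b B' ihB =>
      intro A g
      induction A with
      | nil => rw [pvMerge_nilL, pvMerge_nilL]
      | cons a A' ihA =>
          have hins : PySem.List.insertBy (fun a b => decide (a.2.1 < b.2.1)) g (b :: B')
              = if g.2.1 < b.2.1 then g :: b :: B'
                else b :: PySem.List.insertBy (fun a b => decide (a.2.1 < b.2.1)) g B' := by
            simp only [PySem.List.insertBy, decide_eq_true_eq]
          rw [pvMerge_cons]
          by_cases hab : a.2.1 ≤ b.2.1
          · rw [if_pos hab]
            rw [show PySem.List.insertBy (fun a b => decide (a.2.1 < b.2.1)) g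
              (a :: pvMerge A' (b :: B'))
              = if g.2.1 < a.2.1 then g :: a :: pvMerge A' (b :: B')
                else a :: PySem.List.insertBy (fun a b => decide (a.2.1 < b.2.1)) g
                  (pvMerge A' (b :: B')) from by
              simp only [PySem.List.insertBy, decide_eq_true_eq]]
            by_cases hga : g.2.1 < a.2.1
            · rw [if_pos hga, hins, if_pos (lt_of_lt_of_le hga hab), pvMerge_cons,
                if_neg (not_le.mpr hga), pvMerge_cons, if_pos hab]
            · rw [if_neg hga, ihA]
              by_cases hgb : g.2.1 < b.2.1
              · rw [hins, if_pos hgb, pvMerge_cons, if_pos (le_of_not_gt hga)]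
              · rw [hins, if_neg hgb, pvMerge_cons, if_pos hab]
          · rw [if_neg hab]
            rw [show PySem.List.insertBy (fun a b => decide (a.2.1 < b.2.1)) g
              (b :: pvMerge (a :: A') B')
              = if g.2.1 < b.2.1 then g :: b :: pvMerge (a :: A') B'
                else b :: PySem.List.insertBy (fun a b => decide (a.2.1 < b.2.1)) g
                  (pvMerge (a :: A') B') from by
              simp only [PySem.List.insertBy, decide_eq_true_eq]]
            by_cases hgb : g.2.1 < b.2.1
            · rw [if_pos hgb, hins, if_pos hgb, pvMerge_cons,
                if_neg (not_le.mpr (lt_trans hgb (lt_of_not_ge hab))), pvMerge_cons, if_neg hab]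
            · rw [if_neg hgb, ihB, hins, if_neg hgb, pvMerge_cons, if_neg hab]

theorem pvFold_ins_merge :
    ∀ (ys X B0 : List (Int × Int × String)),
    ys.foldl (fun acc x => PySem.List.insertBy (fun a b => decide (a.2.1 < b.2.1)) x acc) (pvMerge X B0)
      = pvMerge X (ys.foldl (fun acc x => PySem.List.insertBy (fun a b => decide (a.2.1 < b.2.1)) x acc) B0) := by
  intro ys
  induction ys with
  | nil => intro X B0; rfl
  | cons g ys ih =>
      intro X B0
      simp only [List.foldl_cons]
      rw [pvIns_merge, ih]

-- stable sort of a concatenation = stable merge of the separately sorted halves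
theorem pvSorted_append (xs ys : List (Int × Int × String)) :
    PySem.List.sorted (xs ++ ys) (fun t => t.2.1) false
      = pvMerge (PySem.List.sorted xs (fun t => t.2.1) false)
                (PySem.List.sorted ys (fun t => t.2.1) false) := by
  rw [PySem.List.sorted_eq_foldl_insertBy, PySem.List.sorted_eq_foldl_insertBy,
    PySem.List.sorted_eq_foldl_insertBy, List.foldl_append]
  have := pvFold_ins_merge ys
    (xs.foldl (fun acc x => PySem.List.insertBy (fun a b => decide (a.2.1 < b.2.1)) x acc) []) []
  rw [pvMerge_nilR] at this
  exact this

-- ===== VERDICT (by name: the statement is the Claim_ definition above) =====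
theorem getFullLabelSequence_spec : Claim_equal_getFullLabelSequence := by
  intro segmentSequence labelSequence textArrayLen _
  unfold Spec_getFullLabelSequence getFullLabelSequence getFullLabelSequence_alt
  simp only [pvFoldB_gaps, List.nil_append]
  rw [pvFoldA_fix, pvMergeFix_eq_go, pvSorted_append]
  have hg := pvGapsA_eq _ rfl (PySem.List.sorted2 segmentSequence Prod.fst Prod.snd false)
    (0 - 1) ((textArrayLen - 1) + 1)
  rw [hg]
  simp only [show (0 : Int) - 1 = -1 from by norm_num,
    show textArrayLen - 1 + 1 = textArrayLen from by ring]
  congr 1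
  split_ifs with h <;> simp
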